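-- pv_equiv track=rewrite | github.com/byWhale/second-reader | reading-companion-backend/src/reading_mechanisms/iterator_v1.py | _chapter_text_with_offsets
-- ===== SOURCE A (Python) =====
-- def _chapter_text_with_offsets(paragraphs: dict[int, str]) -> tuple[str, list[tuple[int, int] | None]]:
--     """Render chapter paragraph text with offsets back to paragraph-local coordinates."""
--
--     text_parts: list[str] = []
--     offsets: list[tuple[int, int] | None] = []
--     for paragraph_index, paragraph_text in sorted(paragraphs.items()):
--         if text_parts:
--             text_parts.append("\n\n")
--             offsets.extend([None, None])
--         text_parts.append(paragraph_text)
--         offsets.extend((paragraph_index, char_index) for char_index in range(len(paragraph_text)))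
--     return "".join(text_parts), offsets
-- ===== SOURCE B (Python) =====
-- def _chapter_text_with_offsets(paragraphs: dict[int, str]) -> tuple[str, list[tuple[int, int] | None]]:
--     """Render chapter paragraph text with offsets back to paragraph-local coordinates."""
--     items = sorted(paragraphs.items())
--     text = "\n\n".join(t for _, t in items)
--     # Preallocate the whole offset table as None (separators stay None),
--     # then overwrite each paragraph's window by random access.
--     offsets: list[tuple[int, int] | None] = [None] * len(text)
--     pos = 0
--     for i, t in items:
--         for c in range(len(t)):
--             offsets[pos + c] = (i, c)
--         pos += len(t) + 2
--     return text, offsets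
-- ===== Notes on version B (the rewrite author's own statement) =====
-- stated objective: alternative
-- what changed: A builds text and offsets sequentially in one loop, appending separator sentinels between chunks; B builds the text with one library join and constructs the offset table by preallocating a None-filled array of len(text) and overwriting each paragraph's window in place by random access (separator Nones are never written, they remain from the initial fill).
import Mathlib
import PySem

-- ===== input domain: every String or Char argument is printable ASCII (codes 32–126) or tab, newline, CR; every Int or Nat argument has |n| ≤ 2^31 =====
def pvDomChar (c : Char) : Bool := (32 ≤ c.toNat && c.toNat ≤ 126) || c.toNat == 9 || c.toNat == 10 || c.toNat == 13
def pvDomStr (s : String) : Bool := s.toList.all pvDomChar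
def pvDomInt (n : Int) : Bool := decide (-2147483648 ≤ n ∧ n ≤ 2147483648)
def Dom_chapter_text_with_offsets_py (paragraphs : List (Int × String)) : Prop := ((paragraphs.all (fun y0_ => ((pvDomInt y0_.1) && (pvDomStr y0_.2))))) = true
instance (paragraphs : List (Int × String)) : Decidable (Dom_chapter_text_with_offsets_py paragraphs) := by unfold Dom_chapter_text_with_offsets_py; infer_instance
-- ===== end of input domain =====

-- B replaces A's single sequential loop (appending text parts and None separator sentinels) by a
-- library join for the text plus a preallocated None-filled offset table overwritten window by
-- window with random-access assignment: same cost, a different construction of the offsets.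

-- ===== PORT A =====
-- the loop body of A's for-statement (state = (text_parts, offsets))
def pvStepA (st : List String × List (Option (Int × Int))) (pt : Int × String) :
    List String × List (Option (Int × Int)) :=
  let st' := if st.1 = [] then st else (st.1 ++ ["\n\n"], st.2 ++ [none, none])
  (st'.1 ++ [pt.2],
   st'.2 ++ (PySem.List.pyRange 0 (PySem.Str.len pt.2) 1).map (fun c => some (pt.1, c)))

def chapter_text_with_offsets_py (paragraphs : List (Int × String)) : String × (List (Option (Int × Int))) :=
  let r := (PySem.List.sorted paragraphs (fun p => p.1) false).foldl pvStepA ([], [])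
  (PySem.Str.join "" r.1, r.2)

-- ===== PORT B =====
-- the body of B's outer for-loop (state = (offsets, pos)); the inner 'for c in range(len(t))'
-- assigns offsets[pos + c] = (i, c) by random access (pySetD: Python list index assignment,
-- exact here since every written index is in range)
def pvStepB (st : List (Option (Int × Int)) × Int) (p : Int × String) :
    List (Option (Int × Int)) × Int :=
  ((PySem.List.pyRange 0 (PySem.Str.len p.2) 1).foldl
      (fun o c => PySem.List.pySetD o (st.2 + c) (some (p.1, c))) st.1,
   st.2 + PySem.Str.len p.2 + 2)

def chapter_text_with_offsets_py_alt (paragraphs : List (Int × String)) : String × (List (Option (Int × Int))) :=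
  let items := PySem.List.sorted paragraphs (fun p => p.1) false
  let text := PySem.Str.join "\n\n" (items.map Prod.snd)
  let init : List (Option (Int × Int)) := List.replicate (PySem.Str.len text).toNat none
  let st := items.foldl pvStepB (init, 0)
  (text, st.1)

-- ===== PRECONDITION & SPEC =====
def Spec_chapter_text_with_offsets_py (paragraphs : List (Int × String)) (out : String × (List (Option (Int × Int)))) : Prop := out = chapter_text_with_offsets_py_alt paragraphs
instance (paragraphs : List (Int × String)) (out : String × (List (Option (Int × Int)))) : Decidable (Spec_chapter_text_with_offsets_py paragraphs out) := by unfold Spec_chapter_text_with_offsets_py; infer_instance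

-- ===== CLAIM (what is proved, stated in full; the proofs are below) =====
def Claim_equal_chapter_text_with_offsets_py : Prop := ∀ (paragraphs : List (Int × String)), Dom_chapter_text_with_offsets_py paragraphs → Spec_chapter_text_with_offsets_py paragraphs (chapter_text_with_offsets_py paragraphs)

-- ===== LEMMAS AND PROOFS =====

-- offsets of one paragraph, as A appends them
def pvChunk (p : Int × String) : List (Option (Int × Int)) :=
  (PySem.List.pyRange 0 (PySem.Str.len p.2) 1).map (fun c => some (p.1, c))

-- A's offsets for a sorted item list
def pvOffA : List (Int × String) → List (Option (Int × Int))
  | [] => []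
  | p :: rest => pvChunk p ++ rest.flatMap (fun q => none :: none :: pvChunk q)

-- length of the joined text, i.e. of B's preallocated table
def pvNeed : List (Int × String) → Nat
  | [] => 0
  | p :: rest => p.2.toList.length + (match rest with | [] => 0 | _ :: _ => 2 + pvNeed rest)

-- A's loop, started with a nonempty text_parts accumulator, appends separator + paragraph for
-- every remaining item.
theorem loopA (items : List (Int × String)) (ts : List String) (hts : ts ≠ [])
    (offs : List (Option (Int × Int))) :
    items.foldl pvStepA (ts, offs) =
      (ts ++ items.flatMap (fun p => ["\n\n", p.2]),
       offs ++ items.flatMap (fun p => none :: none :: pvChunk p)) := by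
  induction items generalizing ts offs with
  | nil => simp
  | cons p rest ih =>
      have h1 : pvStepA (ts, offs) p =
          (ts ++ ["\n\n", p.2], offs ++ (none :: none :: pvChunk p)) := by
        simp [pvStepA, hts, pvChunk]
      rw [List.foldl_cons, h1, ih (ts ++ ["\n\n", p.2]) (by simp) _]
      simp

-- joining with "" a list where the separators were inserted by hand = joining with the separator
theorem joinAux (sep : List Char) (ts : List (List Char)) (t : List Char) :
    PySem.Chars.join [] (t :: ts.flatMap (fun u => [sep, u])) =
      PySem.Chars.join sep (t :: ts) := by
  induction ts generalizing t with
  | nil => simp [PySem.Chars.join_singleton]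
  | cons u us ih =>
      have : (u :: us).flatMap (fun u => [sep, u]) = sep :: u :: us.flatMap (fun u => [sep, u]) := by
        simp
      rw [this, PySem.Chars.join_cons_cons, PySem.Chars.join_cons_cons,
          PySem.Chars.join_cons_cons, ih u]
      simp

-- B's inner loop fills the next m cells of the None-padded table with the paragraph's chunk
theorem fillB (i : Int) : ∀ (m s : Nat) (done : List (Option (Int × Int))),
    (PySem.List.pyRange 0 (m : Int) 1).foldl
        (fun o c => PySem.List.pySetD o ((done.length : Int) + c) (some (i, c)))
        (done ++ List.replicate (m + s) none)
      = done ++ (PySem.List.pyRange 0 (m : Int) 1).map (fun c => some (i, c))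
          ++ List.replicate s none := by
  intro m
  induction m with
  | zero => intro s done; simp [PySem.List.pyRange_one_eq_nil]
  | succ m ih =>
      intro s done
      have hsplit : PySem.List.pyRange 0 ((m + 1 : Nat) : Int) 1
          = PySem.List.pyRange 0 (m : Int) 1 ++ [(m : Int)] := by
        push_cast
        exact PySem.List.pyRange_one_succ_right (by positivity)
      have hrep : (m + 1 + s) = m + (s + 1) := by omega
      rw [hsplit, List.foldl_append, hrep, ih (s + 1) done]
      have hidx : ((done.length : Int) + (m : Int))
          = (((done ++ (PySem.List.pyRange 0 (m : Int) 1).map (fun c => some (i, c))).length : Nat) : Int) := by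
        simp [PySem.List.length_pyRange_one]
      simp only [List.foldl_cons, List.foldl_nil, hidx, PySem.List.pySetD_natCast,
        List.replicate_succ, List.append_assoc]
      rw [← List.append_assoc done]
      rw [List.set_append_right _ _ (by omega)]
      simp [List.map_append]

-- B's outer loop, started at position |done| on the table done ++ padding, produces A's offsets
theorem loopB : ∀ (items : List (Int × String)) (done : List (Option (Int × Int))),
    (items.foldl pvStepB (done ++ List.replicate (pvNeed items) none, (done.length : Int))).1
      = done ++ pvOffA items := by
  intro items
  induction items with
  | nil => intro done; simp [pvNeed, pvOffA]
  | cons p rest ih =>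
      intro done
      have hlen : PySem.Str.len p.2 = ((p.2.toList.length : Nat) : Int) := by simp
      cases rest with
      | nil =>
          have hfill : pvStepB (done ++ List.replicate (pvNeed [p]) none, (done.length : Int)) p
              = (done ++ pvChunk p, (done.length : Int) + PySem.Str.len p.2 + 2) := by
            show ((PySem.List.pyRange 0 (PySem.Str.len p.2) 1).foldl
                    (fun o c => PySem.List.pySetD o ((done.length : Int) + c) (some (p.1, c)))
                    (done ++ List.replicate (pvNeed [p]) none), _) = _
            rw [hlen, show pvNeed [p] = p.2.toList.length + 0 from by simp [pvNeed],
              fillB p.1 p.2.toList.length 0 done]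
            simp [pvChunk]
          rw [List.foldl_cons, hfill]
          simp [pvOffA]
      | cons q rs =>
          have hfill : pvStepB (done ++ List.replicate (pvNeed (p :: q :: rs)) none,
                (done.length : Int)) p
              = (done ++ pvChunk p ++ List.replicate (2 + pvNeed (q :: rs)) none,
                 (done.length : Int) + PySem.Str.len p.2 + 2) := by
            show ((PySem.List.pyRange 0 (PySem.Str.len p.2) 1).foldl
                    (fun o c => PySem.List.pySetD o ((done.length : Int) + c) (some (p.1, c)))
                    (done ++ List.replicate (pvNeed (p :: q :: rs)) none), _) = _
            rw [hlen, show pvNeed (p :: q :: rs)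
                = p.2.toList.length + (2 + pvNeed (q :: rs)) from rfl,
              fillB p.1 p.2.toList.length (2 + pvNeed (q :: rs)) done]
            simp [pvChunk]
          have hrep : List.replicate (2 + pvNeed (q :: rs)) (none : Option (Int × Int))
              = [none, none] ++ List.replicate (pvNeed (q :: rs)) none := by
            rw [List.replicate_add]; rfl
          have hpos : (done.length : Int) + PySem.Str.len p.2 + 2
              = (((done ++ pvChunk p ++ [none, none]).length : Nat) : Int) := by
            simp [pvChunk, PySem.List.length_pyRange_one]
            omega
          rw [List.foldl_cons, hfill, hrep, hpos,
            show done ++ pvChunk p ++ ([none, none] ++ List.replicate (pvNeed (q :: rs)) none)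
                = (done ++ pvChunk p ++ [none, none]) ++ List.replicate (pvNeed (q :: rs)) none
              from by simp]
          rw [ih (done ++ pvChunk p ++ [none, none])]
          simp [pvOffA]

-- the joined text has exactly pvNeed items characters
theorem lenJoin : ∀ (items : List (Int × String)),
    (PySem.Chars.join "\n\n".toList (items.map (fun p => p.2.toList))).length = pvNeed items := by
  intro items
  induction items with
  | nil => simp [pvNeed]
  | cons p rest ih =>
      cases rest with
      | nil => simp [PySem.Chars.join_singleton, pvNeed]
      | cons q rs =>
          rw [List.map_cons, List.map_cons, PySem.Chars.join_cons_cons]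
          rw [List.map_cons] at ih
          simp only [List.length_append, ih]
          simp [pvNeed]
          omega

-- ===== VERDICT (by name: the statement is the Claim_ definition above) =====
theorem chapter_text_with_offsets_py_spec : Claim_equal_chapter_text_with_offsets_py := by
  intro paragraphs _
  unfold Spec_chapter_text_with_offsets_py chapter_text_with_offsets_py chapter_text_with_offsets_py_alt
  generalize PySem.List.sorted paragraphs (fun p => p.1) false = items
  have htext : PySem.Str.join "" ((items.foldl pvStepA ([], [])).1)
      = PySem.Str.join "\n\n" (items.map Prod.snd) := by
    cases items with
    | nil => rfl
    | cons p rest =>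
        have h0 : pvStepA ([], []) p = ([p.2], pvChunk p) := by simp [pvStepA, pvChunk]
        rw [List.foldl_cons, h0, loopA rest [p.2] (by simp) (pvChunk p)]
        show PySem.Str.join "" ([p.2] ++ rest.flatMap (fun q => ["\n\n", q.2]))
            = PySem.Str.join "\n\n" (p.2 :: rest.map Prod.snd)
        unfold PySem.Str.join
        congr 1
        have := joinAux "\n\n".toList (rest.map (fun q => q.2.toList)) p.2.toList
        simpa [List.flatMap_map, List.map_flatMap, Function.comp] using this
  have hlen : (PySem.Str.len (PySem.Str.join "\n\n" (items.map Prod.snd))).toNat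
      = pvNeed items := by
    have h1 : (PySem.Str.join "\n\n" (items.map Prod.snd)).toList
        = PySem.Chars.join "\n\n".toList (items.map (fun p => p.2.toList)) := by
      simp [PySem.Str.toList_join, List.map_map, Function.comp_def]
    have h2 := lenJoin items
    rw [← h1] at h2
    simp [← h2]
  have hoffs : (items.foldl pvStepA ([], [])).2 = pvOffA items := by
    cases items with
    | nil => rfl
    | cons p rest =>
        have h0 : pvStepA ([], []) p = ([p.2], pvChunk p) := by simp [pvStepA, pvChunk]
        rw [List.foldl_cons, h0, loopA rest [p.2] (by simp) (pvChunk p)]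
        simp [pvOffA]
  have hB : (items.foldl pvStepB
      (List.replicate (PySem.Str.len (PySem.Str.join "\n\n" (items.map Prod.snd))).toNat none, 0)).1
      = pvOffA items := by
    rw [hlen]
    have := loopB items []
    simpa using this
  refine Prod.ext htext ?_
  show (items.foldl pvStepA ([], [])).2
      = (items.foldl pvStepB
          (List.replicate (PySem.Str.len (PySem.Str.join "\n\n" (items.map Prod.snd))).toNat none, 0)).1
  rw [hoffs, hB]
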